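-- pv_equiv track=rewrite | github.com/hmk252/ARC-9th-place | src/arc_2020_ensemble_26_solutions.py | NWSym_Eq
-- ===== SOURCE A (Python) =====
-- def NWSym_Eq(x, Param):
--     n = len(x)
--     k = len(x[0])
--     s = Param
--     Ans = []
--     for i in range(n):
--         for j in range(k):
--             i1 = s + j
--             j1 = -s + i
--             if i1 < 0 or i1 >= n or j1 < 0 or j1 >= k:
--                 continue
--             a = (i, j)
--             b = (i1, j1)
--             if [a, b] in Ans or [b, a] in Ans or a == b:
--                 continue
--             Ans.append([a, b])
--     return Ans
-- ===== SOURCE B (Python) =====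
-- def NWSym_Eq(x, Param):
--     n = len(x)
--     k = len(x[0])
--     s = Param
--     return [[(i, j), (s + j, -s + i)]
--             for i in range(n) for j in range(k)
--             if 0 <= s + j < n and 0 <= -s + i < k and (i, j) < (s + j, -s + i)]
-- ===== Notes on version B (the rewrite author's own statement) =====
-- stated objective: simpler
-- what changed: B exploits that the pairing map (i,j)->(s+j,-s+i) is an involution: it emits each pair once via a local tuple comparison (i,j)<(s+j,-s+i) in a single comprehension, replacing A's accumulator with membership scans of the growing answer list.
-- outside the precondition, e.g. on NWSym_Eq([], 0): A raises IndexError, B raises IndexError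
import Mathlib
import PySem

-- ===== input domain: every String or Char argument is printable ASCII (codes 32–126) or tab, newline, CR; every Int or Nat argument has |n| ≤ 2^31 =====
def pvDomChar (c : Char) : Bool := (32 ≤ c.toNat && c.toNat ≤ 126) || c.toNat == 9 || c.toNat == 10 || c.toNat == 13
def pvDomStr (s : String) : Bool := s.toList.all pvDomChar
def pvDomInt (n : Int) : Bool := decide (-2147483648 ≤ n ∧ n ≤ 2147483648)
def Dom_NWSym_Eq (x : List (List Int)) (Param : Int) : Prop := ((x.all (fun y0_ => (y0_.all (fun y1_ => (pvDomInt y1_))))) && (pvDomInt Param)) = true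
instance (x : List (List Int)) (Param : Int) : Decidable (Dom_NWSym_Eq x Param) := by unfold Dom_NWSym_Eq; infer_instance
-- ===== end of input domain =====

-- B replaces A's membership scans of the accumulated answer with a local lexicographic
-- comparison (the pairing map is an involution), as a single comprehension: simpler.


-- ===== PORT A =====
def NWSym_Eq (x : List (List Int)) (Param : Int) : List (List (Int × Int)) :=
  let n : Int := x.length
  -- x[0]: Python raises IndexError when x = []; Pre_ excludes that, the getD default is never read there
  let k : Int := ((PySem.List.pyGet? x 0).getD []).length
  let s : Int := Param
  (PySem.List.pyRange 0 n 1).foldl (fun Ans i =>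
    (PySem.List.pyRange 0 k 1).foldl (fun Ans j =>
      let i1 := s + j
      let j1 := -s + i
      if i1 < 0 ∨ i1 ≥ n ∨ j1 < 0 ∨ j1 ≥ k then Ans
      else
        let a := (i, j)
        let b := (i1, j1)
        if [a, b] ∈ Ans ∨ [b, a] ∈ Ans ∨ a = b then Ans
        else Ans ++ [[a, b]]) Ans) []

-- ===== PORT B =====
-- B is one comprehension: emit [(i,j),(s+j,-s+i)] exactly when the partner is in bounds
-- and (i,j) < (s+j,-s+i) in Python tuple order (written out as the lexicographic disjunction).
def NWSym_Eq_alt (x : List (List Int)) (Param : Int) : List (List (Int × Int)) :=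
  let n : Int := x.length
  let k : Int := ((PySem.List.pyGet? x 0).getD []).length
  let s : Int := Param
  (PySem.List.pyRange 0 n 1).flatMap (fun i =>
    (PySem.List.pyRange 0 k 1).flatMap (fun j =>
      if (0 ≤ s + j ∧ s + j < n ∧ 0 ≤ -s + i ∧ -s + i < k) ∧
         (i < s + j ∨ (i = s + j ∧ j < -s + i)) then
        [[(i, j), (s + j, -s + i)]]
      else []))

-- ===== PRECONDITION & SPEC =====
-- Pre_ excludes only x = [], where Python's x[0] raises IndexError.
def Pre_NWSym_Eq (x : List (List Int)) (Param : Int) : Prop := x ≠ []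
instance (x : List (List Int)) (Param : Int) : Decidable (Pre_NWSym_Eq x Param) := by unfold Pre_NWSym_Eq; infer_instance
def pvWitness_NWSym_Eq : List (List Int) × Int := ([[1, 2], [3, 4]], 0)

def Spec_NWSym_Eq (x : List (List Int)) (Param : Int) (out : List (List (Int × Int))) : Prop := out = NWSym_Eq_alt x Param
instance (x : List (List Int)) (Param : Int) (out : List (List (Int × Int))) : Decidable (Spec_NWSym_Eq x Param out) := by unfold Spec_NWSym_Eq; infer_instance

-- ===== CLAIM (what is proved, stated in full; the proofs are below) =====
def Claim_equal_NWSym_Eq : Prop := ∀ (x : List (List Int)) (Param : Int), Dom_NWSym_Eq x Param → Pre_NWSym_Eq x Param → Spec_NWSym_Eq x Param (NWSym_Eq x Param)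

-- ===== LEMMAS AND PROOFS =====

-- the pairing map, the in-bounds predicate, lexicographic order, the row-major cell list
def pvF (s : Int) (p : Int × Int) : Int × Int := (s + p.2, -s + p.1)
abbrev pvInb (n k : Int) (p : Int × Int) : Prop := 0 ≤ p.1 ∧ p.1 < n ∧ 0 ≤ p.2 ∧ p.2 < k
abbrev pvLex (p q : Int × Int) : Prop := p.1 < q.1 ∨ (p.1 = q.1 ∧ p.2 < q.2)
def pvCells (n k : Int) : List (Int × Int) :=
  (PySem.List.pyRange 0 n 1).flatMap (fun i => (PySem.List.pyRange 0 k 1).map (fun j => (i, j)))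

-- B's per-cell emission and A's per-cell step
def pvG (n k s : Int) (p : Int × Int) : List (List (Int × Int)) :=
  if pvInb n k (pvF s p) ∧ pvLex p (pvF s p) then [[p, pvF s p]] else []

lemma pvF_invol (s : Int) (p : Int × Int) : pvF s (pvF s p) = p := by
  simp [pvF]

lemma pvLex_irrefl (p : Int × Int) : ¬ pvLex p p := by
  simp [pvLex]

lemma pvLex_asymm {p q : Int × Int} (h : pvLex p q) : ¬ pvLex q p := by
  rcases h with h | ⟨h1, h2⟩ <;> simp [pvLex] <;> omega

lemma pvLex_of_ne_of_not {p q : Int × Int} (hne : p ≠ q) (h : ¬ pvLex q p) : pvLex p q := by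
  simp [pvLex] at h ⊢
  rcases p with ⟨a, b⟩; rcases q with ⟨c, d⟩
  simp [Prod.mk.injEq] at hne
  omega

lemma mem_pvCells {n k : Int} {p : Int × Int} : p ∈ pvCells n k ↔ pvInb n k p := by
  simp [pvCells, List.mem_flatMap, List.mem_map, PySem.List.mem_pyRange_one, pvInb]
  constructor
  · rintro ⟨i, hi, j, hj, rfl⟩; exact ⟨hi.1, hi.2, hj.1, hj.2⟩
  · rintro ⟨h1, h2, h3, h4⟩; exact ⟨p.1, ⟨h1, h2⟩, p.2, ⟨h3, h4⟩, rfl⟩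

lemma pairwise_pvCells (n k : Int) : (pvCells n k).Pairwise pvLex := by
  rw [pvCells, List.pairwise_flatMap]
  constructor
  · intro i _
    rw [List.pairwise_map]
    exact (PySem.List.pairwise_lt_pyRange_one 0 k).imp (fun h => Or.inr ⟨rfl, h⟩)
  · refine (PySem.List.pairwise_lt_pyRange_one 0 n).imp ?_
    intro i i' h p hp q hq
    simp only [List.mem_map] at hp hq
    rcases hp with ⟨j, _, rfl⟩; rcases hq with ⟨j', _, rfl⟩
    exact Or.inl h

-- the step of A, written as the literal lambda body of the port
lemma pv_mem_flatMap_G (n k s : Int) (P : List (Int × Int)) (z : List (Int × Int)) :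
    z ∈ P.flatMap (pvG n k s) ↔
      ∃ p ∈ P, (pvInb n k (pvF s p) ∧ pvLex p (pvF s p)) ∧ z = [p, pvF s p] := by
  rw [List.mem_flatMap]
  refine exists_congr fun p => and_congr_right fun _ => ?_
  unfold pvG; split
  · rename_i hc
    simp only [List.mem_singleton]
    exact ⟨fun hz => ⟨hc, hz⟩, fun hz => hz.2⟩
  · rename_i hc
    simp only [List.not_mem_nil, false_iff]
    exact fun hz => hc hz.1

lemma pv_step_eq (n k s : Int) (P : List (Int × Int)) (a : Int × Int)
    (ha_in : pvInb n k a) (ha_not : a ∉ P)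
    (hchar : pvInb n k (pvF s a) → (pvF s a ∈ P ↔ pvLex (pvF s a) a)) :
    (if s + a.2 < 0 ∨ s + a.2 ≥ n ∨ -s + a.1 < 0 ∨ -s + a.1 ≥ k then P.flatMap (pvG n k s)
     else if [(a.1, a.2), (s + a.2, -s + a.1)] ∈ P.flatMap (pvG n k s) ∨
             [(s + a.2, -s + a.1), (a.1, a.2)] ∈ P.flatMap (pvG n k s) ∨
             (a.1, a.2) = (s + a.2, -s + a.1) then P.flatMap (pvG n k s)
     else P.flatMap (pvG n k s) ++ [[(a.1, a.2), (s + a.2, -s + a.1)]]) =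
    (P ++ [a]).flatMap (pvG n k s) := by
  have hfa : pvF s a = (s + a.2, -s + a.1) := rfl
  rw [List.flatMap_append, List.flatMap_singleton]
  by_cases hb : s + a.2 < 0 ∨ s + a.2 ≥ n ∨ -s + a.1 < 0 ∨ -s + a.1 ≥ k
  · rw [if_pos hb]
    have hga : pvG n k s a = [] := by
      unfold pvG; rw [if_neg]
      rintro ⟨hinb, -⟩
      rw [hfa] at hinb
      rcases hinb with ⟨h1, h2, h3, h4⟩
      simp only at h1 h2 h3 h4
      omega
    rw [hga, List.append_nil]
  · rw [if_neg hb]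
    push Not at hb
    have hinb : pvInb n k (pvF s a) := by
      rw [hfa]; exact ⟨hb.1, hb.2.1, hb.2.2.1, hb.2.2.2⟩
    by_cases hab : (a.1, a.2) = (s + a.2, -s + a.1)
    · rw [if_pos (Or.inr (Or.inr hab))]
      have hga : pvG n k s a = [] := by
        unfold pvG; rw [if_neg]
        rintro ⟨-, hlex⟩
        have haeq : a = pvF s a := by rw [hfa]; exact hab
        rw [← haeq] at hlex
        exact pvLex_irrefl a hlex
      rw [hga, List.append_nil]
    · by_cases hlex : pvLex (pvF s a) a
      · have hmemP : pvF s a ∈ P := (hchar hinb).mpr hlex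
        have hg2 : pvG n k s (pvF s a) = [[pvF s a, a]] := by
          unfold pvG
          rw [pvF_invol, if_pos ⟨ha_in, hlex⟩]
        have hbmem : [(s + a.2, -s + a.1), (a.1, a.2)] ∈ P.flatMap (pvG n k s) := by
          rw [List.mem_flatMap]
          exact ⟨pvF s a, hmemP, by rw [hg2, hfa]; exact List.mem_singleton.mpr rfl⟩
        rw [if_pos (Or.inr (Or.inl hbmem))]
        have hga : pvG n k s a = [] := by
          unfold pvG; rw [if_neg]
          rintro ⟨-, hl⟩
          exact pvLex_asymm hl hlex
        rw [hga, List.append_nil]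
      · have hlex' : pvLex a (pvF s a) :=
          pvLex_of_ne_of_not (fun h => hab (by rw [← hfa, ← h])) hlex
        have hga : pvG n k s a = [[a, pvF s a]] := by
          unfold pvG; rw [if_pos ⟨hinb, hlex'⟩]
        rw [if_neg, hga, hfa]
        rintro (h | h | h)
        · rcases (pv_mem_flatMap_G n k s P _).mp h with ⟨p, hp, -, heq⟩
          simp only [List.cons.injEq, and_true] at heq
          rw [← heq.1] at hp
          exact ha_not hp
        · rcases (pv_mem_flatMap_G n k s P _).mp h with ⟨p, hp, ⟨-, hplex⟩, heq⟩
          simp only [List.cons.injEq, and_true] at heq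
          have hp1 : pvF s a = p := by rw [hfa]; exact heq.1
          rw [← hp1, pvF_invol] at hplex
          exact hlex hplex
        · exact hab h

lemma pv_loop (n k s : Int) :
    ∀ (S P : List (Int × Int)), pvCells n k = P ++ S →
      S.foldl (fun Ans p =>
        if s + p.2 < 0 ∨ s + p.2 ≥ n ∨ -s + p.1 < 0 ∨ -s + p.1 ≥ k then Ans
        else if [(p.1, p.2), (s + p.2, -s + p.1)] ∈ Ans ∨
                [(s + p.2, -s + p.1), (p.1, p.2)] ∈ Ans ∨ (p.1, p.2) = (s + p.2, -s + p.1) then Ans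
        else Ans ++ [[(p.1, p.2), (s + p.2, -s + p.1)]]) (P.flatMap (pvG n k s)) =
      (pvCells n k).flatMap (pvG n k s) := by
  intro S
  induction S with
  | nil => intro P h; rw [List.foldl_nil, h, List.append_nil]
  | cons a S' ih =>
    intro P h
    have hpw : (pvCells n k).Pairwise pvLex := pairwise_pvCells n k
    rw [h, List.pairwise_append] at hpw
    have hPa : ∀ p ∈ P, pvLex p a := fun p hp => hpw.2.2 p hp a List.mem_cons_self
    have haS : ∀ q ∈ S', pvLex a q := (List.pairwise_cons.mp hpw.2.1).1
    have ha_in : pvInb n k a := mem_pvCells.mp (h ▸ List.mem_append_right P List.mem_cons_self)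
    have ha_not : a ∉ P := fun hmem => pvLex_irrefl a (hPa a hmem)
    have hchar : pvInb n k (pvF s a) → (pvF s a ∈ P ↔ pvLex (pvF s a) a) := by
      intro hinb
      constructor
      · exact hPa _
      · intro hl
        have hbc : pvF s a ∈ P ++ a :: S' := h ▸ mem_pvCells.mpr hinb
        rcases List.mem_append.mp hbc with hP | hc
        · exact hP
        · rcases List.mem_cons.mp hc with heq | hS'
          · rw [heq] at hl; exact absurd hl (pvLex_irrefl a)
          · exact absurd hl (pvLex_asymm (haS _ hS'))
    rw [List.foldl_cons, pv_step_eq n k s P a ha_in ha_not hchar,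
        ih (P ++ [a]) (by rw [h, List.append_assoc]; rfl)]

lemma pv_nested_foldl (n k : Int) (F : List (List (Int × Int)) → (Int × Int) → List (List (Int × Int)))
    (init : List (List (Int × Int))) :
    (PySem.List.pyRange 0 n 1).foldl (fun A i =>
      (PySem.List.pyRange 0 k 1).foldl (fun A j => F A (i, j)) A) init =
    (pvCells n k).foldl F init := by
  rw [pvCells, List.foldl_flatMap]
  simp only [List.foldl_map]

lemma pv_nested_flatMap (n k : Int) (G : (Int × Int) → List (List (Int × Int))) :
    (PySem.List.pyRange 0 n 1).flatMap (fun i =>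
      (PySem.List.pyRange 0 k 1).flatMap (fun j => G (i, j))) =
    (pvCells n k).flatMap G := by
  rw [pvCells, List.flatMap_assoc]
  simp only [List.flatMap_map]

lemma pv_A_eq (n k s : Int) :
    (PySem.List.pyRange 0 n 1).foldl (fun Ans i =>
      (PySem.List.pyRange 0 k 1).foldl (fun Ans j =>
        let i1 := s + j
        let j1 := -s + i
        if i1 < 0 ∨ i1 ≥ n ∨ j1 < 0 ∨ j1 ≥ k then Ans
        else
          let a := (i, j)
          let b := (i1, j1)
          if [a, b] ∈ Ans ∨ [b, a] ∈ Ans ∨ a = b then Ans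
          else Ans ++ [[a, b]]) Ans) [] =
    (pvCells n k).flatMap (pvG n k s) := by
  have h := pv_nested_foldl n k (fun Ans p =>
      if s + p.2 < 0 ∨ s + p.2 ≥ n ∨ -s + p.1 < 0 ∨ -s + p.1 ≥ k then Ans
      else if [(p.1, p.2), (s + p.2, -s + p.1)] ∈ Ans ∨
              [(s + p.2, -s + p.1), (p.1, p.2)] ∈ Ans ∨ (p.1, p.2) = (s + p.2, -s + p.1) then Ans
      else Ans ++ [[(p.1, p.2), (s + p.2, -s + p.1)]]) []
  refine Eq.trans ?_ (h.trans ?_)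
  · rfl
  · have h2 := pv_loop n k s (pvCells n k) [] (by simp)
    simpa using h2

lemma pv_B_eq (n k s : Int) :
    (PySem.List.pyRange 0 n 1).flatMap (fun i =>
      (PySem.List.pyRange 0 k 1).flatMap (fun j =>
        if (0 ≤ s + j ∧ s + j < n ∧ 0 ≤ -s + i ∧ -s + i < k) ∧
           (i < s + j ∨ (i = s + j ∧ j < -s + i)) then [[(i, j), (s + j, -s + i)]] else [])) =
    (pvCells n k).flatMap (pvG n k s) := by
  rw [← pv_nested_flatMap n k (pvG n k s)]
  have hpt : ∀ i j : Int,
      (if (0 ≤ s + j ∧ s + j < n ∧ 0 ≤ -s + i ∧ -s + i < k) ∧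
          (i < s + j ∨ (i = s + j ∧ j < -s + i)) then [[(i, j), (s + j, -s + i)]] else []) =
      pvG n k s (i, j) := fun i j => by unfold pvG pvF; rfl
  simp only [hpt]

-- ===== VERDICT (by name: the statement is the Claim_ definition above) =====
theorem NWSym_Eq_spec : Claim_equal_NWSym_Eq := by
  intro x Param _ _
  show NWSym_Eq x Param = NWSym_Eq_alt x Param
  unfold NWSym_Eq NWSym_Eq_alt
  exact (pv_A_eq _ _ _).trans (pv_B_eq _ _ _).symm
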